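-- pv_equiv track=rewrite | github.com/jmjeon94/Algorithm-Programmers | Lv1/신고결과받기.py | solution
-- ===== SOURCE A (Python) =====
-- from collections import defaultdict
--
-- def solution(id_list, report, k):
--     report = list(set(report))
--
--     dec_names = defaultdict(list)
--     cnts = defaultdict(int)
--
--     for r in report:
--         n = r.split(' ')
--         dec_names[n[0]].append(n[1])
--         cnts[n[1]] += 1
--
--     answer = []
--     for _id in id_list:
--         cnt = 0
--         for dec in dec_names[_id]:
--             if cnts[dec] >= k:
--                 cnt += 1
--         answer.append(cnt)
--
--     return answer
-- ===== SOURCE B (Python) =====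
-- def solution(id_list, report, k):
--     pairs = [(n[0], n[1]) for n in (r.split(' ') for r in set(report))]
--     banned = {y for _, y in pairs if sum(1 for _, y2 in pairs if y2 == y) >= k}
--     return [sum(1 for x, y in pairs if x == i and y in banned) for i in id_list]
-- ===== Notes on version B (the rewrite author's own statement) =====
-- stated objective: simpler
-- what changed: B removes A's defaultdict grouping and counting machinery entirely: it dedups reports into (reporter, reported) pairs, computes the banned set by counting each reported name with a direct scan over the pairs, and answers each id by counting its pairs whose target is banned — three comprehensions, no dicts.
import Mathlib
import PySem

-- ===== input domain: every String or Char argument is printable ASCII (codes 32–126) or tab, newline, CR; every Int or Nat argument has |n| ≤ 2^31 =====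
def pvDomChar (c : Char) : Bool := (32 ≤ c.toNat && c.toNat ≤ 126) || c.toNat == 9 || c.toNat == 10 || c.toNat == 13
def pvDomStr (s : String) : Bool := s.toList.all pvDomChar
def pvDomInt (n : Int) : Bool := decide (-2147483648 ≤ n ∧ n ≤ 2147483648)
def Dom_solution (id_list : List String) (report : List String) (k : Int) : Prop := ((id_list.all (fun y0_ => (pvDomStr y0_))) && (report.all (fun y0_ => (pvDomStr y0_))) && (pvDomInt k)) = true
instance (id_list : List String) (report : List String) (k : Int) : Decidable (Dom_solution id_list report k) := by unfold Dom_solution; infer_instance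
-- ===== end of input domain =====

-- ===== PORT A =====
-- B drops A's dict-based grouping/counting entirely: it works on the deduplicated
-- (reporter, reported) pairs with nested counting scans and a banned set (simpler, not faster).
def solution (id_list : List String) (report : List String) (k : Int) : List Int :=
  let rep := PySem.Set.ofList report
  let st := rep.foldl
    (fun (st : PySem.Dict String (List String) × PySem.Dict String Int) r =>
      let n := (PySem.Str.split? r " ").getD []
      ((st.1).modify ((PySem.List.pyGet? n 0).getD "") [] (· ++ [(PySem.List.pyGet? n 1).getD ""]),
       (st.2).modify ((PySem.List.pyGet? n 1).getD "") 0 (· + 1)))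
    (PySem.Dict.empty, PySem.Dict.empty)
  id_list.foldl
    (fun answer _id =>
      answer ++ [((st.1).getD _id []).foldl
        (fun cnt dec => if (st.2).getD dec 0 ≥ k then cnt + 1 else cnt) 0])
    []

-- ===== PORT B =====
def solution_alt (id_list : List String) (report : List String) (k : Int) : List Int :=
  let pairs := (PySem.Set.ofList report).map (fun r =>
      let n := (PySem.Str.split? r " ").getD []
      ((PySem.List.pyGet? n 0).getD "", (PySem.List.pyGet? n 1).getD ""))
  let banned : PySem.Set String := PySem.Set.ofList
      ((pairs.filter (fun p =>
          decide (((pairs.filter (fun q => q.2 == p.2)).length : Int) ≥ k))).map (·.2))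
  id_list.map (fun i =>
      ((pairs.filter (fun p => p.1 == i && banned.contains p.2)).length : Int))

-- ===== PRECONDITION & SPEC =====
-- Pre_ excludes exactly the inputs where a report string contains no space,
-- on which A raises IndexError at n[1].
def Pre_solution (id_list : List String) (report : List String) (k : Int) : Prop :=
  ∀ r ∈ report, ' ' ∈ r.toList
instance (id_list : List String) (report : List String) (k : Int) : Decidable (Pre_solution id_list report k) := by unfold Pre_solution; infer_instance
def pvWitness_solution : List String × List String × Int := (["a", "b"], ["a b", "b a"], 1)

def Spec_solution (id_list : List String) (report : List String) (k : Int) (out : List Int) : Prop := out = solution_alt id_list report k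
instance (id_list : List String) (report : List String) (k : Int) (out : List Int) : Decidable (Spec_solution id_list report k out) := by unfold Spec_solution; infer_instance

-- ===== CLAIM (what is proved, stated in full; the proofs are below) =====
def Claim_equal_solution : Prop := ∀ (id_list : List String) (report : List String) (k : Int), Dom_solution id_list report k → Pre_solution id_list report k → Spec_solution id_list report k (solution id_list report k)

-- ===== LEMMAS AND PROOFS =====

-- A-side grouping fold, read back per key: the per-reporter list of reported names
theorem pvGroup_getD (f : String → String × String) (l : List String)
    (d : PySem.Dict String (List String)) (c : String) :
    (l.foldl (fun d r => d.modify (f r).1 [] (· ++ [(f r).2])) d).getD c []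
      = d.getD c [] ++ (((l.map f).filter (fun p => p.1 == c)).map (·.2)) := by
  have h := PySem.Dict.getD_foldl_modify_append (l.map f) d c
  rw [List.foldl_map] at h
  exact h

-- A-side counting fold, read back per key
theorem pvCnt_getD (f : String → String × String) (l : List String)
    (d : PySem.Dict String Int) (v : String) :
    (l.foldl (fun d r => d.modify (f r).2 0 (· + 1)) d).getD v 0
      = d.getD v 0 + (((l.map f).map (·.2)).count v : Int) := by
  have h := PySem.Dict.getD_foldl_modify_add_one ((l.map f).map (·.2)) d v
  rw [List.foldl_map, List.foldl_map] at h
  exact h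

-- B's inner counting scan counts an element of the projected list
theorem pvCnt_filter_len (pairs : List (String × String)) (y : String) :
    ((pairs.filter (fun q => q.2 == y)).length : Int) = ((pairs.map (·.2)).count y : Int) := by
  rw [List.count, List.countP_map, List.countP_eq_length_filter]
  rfl

-- membership in B's banned set, for a name that occurs as a reported name
theorem pvMem_banned (pairs : List (String × String)) (k : Int) (y : String)
    (hy : y ∈ pairs.map (·.2)) :
    (y ∈ PySem.Set.ofList ((pairs.filter (fun p =>
        decide (((pairs.filter (fun q => q.2 == p.2)).length : Int) ≥ k))).map (·.2)))
      ↔ ((pairs.map (·.2)).count y : Int) ≥ k := by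
  rw [PySem.Set.mem_ofList, List.mem_map]
  constructor
  · rintro ⟨p, hp, rfl⟩
    rw [List.mem_filter] at hp
    have := of_decide_eq_true hp.2
    rwa [pvCnt_filter_len] at this
  · intro hk
    rcases List.mem_map.mp hy with ⟨p, hp, rfl⟩
    exact ⟨p, List.mem_filter.mpr ⟨hp, decide_eq_true (by rwa [pvCnt_filter_len])⟩, rfl⟩

-- A's per-id count equals B's per-id filtered length
theorem pvPerId (pairs : List (String × String)) (k : Int) (i : String) :
    ((((pairs.filter (fun p => p.1 == i)).map (·.2)).countP
        (fun y => decide (((pairs.map (·.2)).count y : Int) ≥ k)) : Int))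
      = ((pairs.filter (fun p => p.1 == i &&
          (PySem.Set.ofList ((pairs.filter (fun p =>
              decide (((pairs.filter (fun q => q.2 == p.2)).length : Int) ≥ k))).map (·.2))).contains p.2)).length : Int) := by
  rw [List.countP_map, List.countP_filter, ← List.countP_eq_length_filter]
  congr 1
  apply List.countP_congr
  intro p hp
  have hmem : p.2 ∈ pairs.map (·.2) := List.mem_map.mpr ⟨p, hp, rfl⟩
  have hc : (PySem.Set.ofList ((pairs.filter (fun p =>
      decide (((pairs.filter (fun q => q.2 == p.2)).length : Int) ≥ k))).map (·.2))).contains p.2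
      = decide (((pairs.map (·.2)).count p.2 : Int) ≥ k) := by
    by_cases h : ((pairs.map (·.2)).count p.2 : Int) ≥ k
    · simp only [h, decide_true]
      exact (PySem.Set.contains_iff _ _).mpr ((pvMem_banned pairs k p.2 hmem).mpr h)
    · simp only [h, decide_false]
      by_contra hcon
      exact h ((pvMem_banned pairs k p.2 hmem).mp
        ((PySem.Set.contains_iff _ _).mp (by revert hcon; cases hb : (PySem.Set.ofList _).contains p.2 <;> simp)))
  simp only [hc, Function.comp_apply, Bool.and_comm]

-- the whole computation, abstracted over the pair-extraction function
theorem pvMain (f : String → String × String) (rep ids : List String) (k : Int) :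
    (ids.foldl (fun answer _id => answer ++
        [(((rep.foldl (fun (st : PySem.Dict String (List String) × PySem.Dict String Int) r =>
              ((st.1).modify (f r).1 [] (· ++ [(f r).2]), (st.2).modify (f r).2 0 (· + 1)))
            (PySem.Dict.empty, PySem.Dict.empty)).1).getD _id []).foldl
          (fun cnt dec => if ((rep.foldl (fun (st : PySem.Dict String (List String) × PySem.Dict String Int) r =>
              ((st.1).modify (f r).1 [] (· ++ [(f r).2]), (st.2).modify (f r).2 0 (· + 1)))
            (PySem.Dict.empty, PySem.Dict.empty)).2).getD dec 0 ≥ k then cnt + 1 else cnt) 0]) [])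
    = ids.map (fun i =>
        (((rep.map f).filter (fun p => p.1 == i &&
            (PySem.Set.ofList (((rep.map f).filter (fun p =>
                decide ((((rep.map f).filter (fun q => q.2 == p.2)).length : Int) ≥ k))).map (·.2))).contains p.2)).length : Int)) := by
  rw [PySem.List.foldl_prod_mk
      (f := fun (d : PySem.Dict String (List String)) r => d.modify (f r).1 [] (· ++ [(f r).2]))
      (g := fun (d : PySem.Dict String Int) r => d.modify (f r).2 0 (· + 1))]
  simp only [PySem.List.foldl_append_singleton_eq_map, List.nil_append]
  refine List.map_congr_left (fun i _ => ?_)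
  rw [pvGroup_getD]
  simp only [pvCnt_getD, PySem.Dict.getD_empty, List.nil_append, zero_add]
  rw [PySem.List.foldl_ite_add_one (p := fun dec => (((rep.map f).map (·.2)).count dec : Int) ≥ k)]
  rw [zero_add]
  exact pvPerId (rep.map f) k i

-- ===== VERDICT (by name: the statement is the Claim_ definition above) =====
theorem solution_spec : Claim_equal_solution := by
  intro id_list report k _ _
  unfold Spec_solution solution solution_alt
  exact pvMain (fun r =>
      ((PySem.List.pyGet? ((PySem.Str.split? r " ").getD []) 0).getD "",
       (PySem.List.pyGet? ((PySem.Str.split? r " ").getD []) 1).getD ""))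
    (PySem.Set.ofList report) id_list k
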